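-- pv_equiv track=rewrite | github.com/ry4nn9/chess | pieces.py | findSameBlocks
-- ===== SOURCE A (Python) =====
-- def findSameBlocks(x, y, board):
--     # one axis is for two of the same sign changes (pos, pos) or (neg, neg)
--     bound1 = len(board) - 1 - x
--     bound2 = -x
--     bounds = list(range(bound2, bound1+1))
--     down1 = None
--     down2 = None
--     i = 0
--     # find any same color pieces in the way of same sign change diagonal moves
--     while i < len(bounds):
--         dx = bounds[i]
--         # check if new row is within board
--         if 0 <= y+dx < len(board):
--             if board[y+dx][x+dx] != None and (x+dx<x and y+dx<y):
--                     down1 = dx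
--             elif board[y+dx][x+dx] != None and (x+dx>x and y+dx>y):
--                     down2 = dx
--                     break
--         # if row not within board
--         else:
--             if y+dx<y:
--                 down1 = dx
--             elif y+dx>y:
--                 down2 = dx
--         i += 1
--     if down1 == None:
--         down1 = bound2
--     if down2 == None:
--         down2 = bound1
--
--     return down1, down2
-- ===== SOURCE B (Python) =====
-- def findSameBlocks(x, y, board):
--     n = len(board)
--     lo = -x
--     hi = n - 1 - x
--     # scan downward from the square: nearest dx<0 that is off the board or occupied
--     down1 = lo
--     for dx in range(min(-1, hi), lo - 1, -1):
--         if not (0 <= y + dx < n) or board[y + dx][x + dx] is not None: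
--             down1 = dx
--             break
--     # scan upward from the square: nearest dx>0 holding an on-board piece, else the bound
--     down2 = hi
--     for dx in range(max(1, lo), hi + 1):
--         if 0 <= y + dx < n and board[y + dx][x + dx] is not None:
--             down2 = dx
--             break
--     return down1, down2
-- ===== Notes on version B (the rewrite author's own statement) =====
-- stated objective: simpler
-- what changed: Replaced A's single ascending sweep over the whole diagonal range (with overwrite-style state for down1 and a break for down2) by two independent early-exit scans outward from the square: one downward stopping at the first off-board-or-occupied offset, one upward stopping at the first on-board piece, with the board-edge bound as the plain default.
-- intended difference: When the start square lies below the board (y <= -2 with the diagonal's top end still on the board, i.e. max(1,-x) <= -y-1 and 0 <= y+len(board)-1-x < len(board)) and no piece sits on the upward diagonal, A returns down2 = -y-1 (the last off-board offset its sweep happened to record) while B returns the board-edge bound len(board)-1-x, which is the intended no-blocker answer. — e.g. on findSameBlocks(0, -2, [[none, none, none], [none, none, none], [none, none, none]]): A returns (0, 1), B returns (0, 2)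
-- outside the precondition, e.g. on findSameBlocks(0, 0, [[None, 1, 1], [None, 55, None], [None]]): A returns (0, 1), B returns (0, 1)
import Mathlib
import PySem

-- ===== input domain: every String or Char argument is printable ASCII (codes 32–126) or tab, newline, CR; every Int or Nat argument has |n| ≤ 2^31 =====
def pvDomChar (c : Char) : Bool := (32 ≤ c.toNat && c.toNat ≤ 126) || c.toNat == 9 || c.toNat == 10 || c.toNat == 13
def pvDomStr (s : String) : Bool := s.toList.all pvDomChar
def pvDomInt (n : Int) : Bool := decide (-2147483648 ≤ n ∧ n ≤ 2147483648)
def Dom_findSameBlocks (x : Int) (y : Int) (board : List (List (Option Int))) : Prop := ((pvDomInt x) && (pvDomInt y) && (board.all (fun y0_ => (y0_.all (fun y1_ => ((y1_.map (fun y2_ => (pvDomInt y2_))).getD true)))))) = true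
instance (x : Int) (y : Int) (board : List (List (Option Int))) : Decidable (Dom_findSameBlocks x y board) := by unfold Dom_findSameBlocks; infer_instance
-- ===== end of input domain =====

-- B replaces A's single ascending sweep of the diagonal by two early-exit scans outward
-- from (x,y) (objective: simpler); equivalence is about the return value only.

-- ===== PORT A =====
-- board[y+dx][x+dx]: both indices are ≥ 0 whenever read (x+dx ≥ 0 for every dx in range),
-- so pyGetD is exact there; a too-short row (IndexError in Python) is excluded by Pre_.
def pvCell (x : Int) (y : Int) (board : List (List (Option Int))) (dx : Int) : Option Int :=
  PySem.List.pyGetD (PySem.List.pyGetD board (y + dx) []) (x + dx) none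

-- the while-loop of A: state (down1, down2), break at an on-board piece above
def pvLoopA (x : Int) (y : Int) (n : Int) (board : List (List (Option Int))) :
    List Int → Option Int → Option Int → Option Int × Option Int
  | [], d1, d2 => (d1, d2)
  | dx :: rest, d1, d2 =>
    if 0 ≤ y + dx ∧ y + dx < n then
      if pvCell x y board dx ≠ none ∧ (x + dx < x ∧ y + dx < y) then
        pvLoopA x y n board rest (some dx) d2
      else if pvCell x y board dx ≠ none ∧ (x + dx > x ∧ y + dx > y) then
        (d1, some dx)                       -- break
      else pvLoopA x y n board rest d1 d2
    else
      if y + dx < y then pvLoopA x y n board rest (some dx) d2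
      else if y + dx > y then pvLoopA x y n board rest d1 (some dx)
      else pvLoopA x y n board rest d1 d2

def findSameBlocks (x : Int) (y : Int) (board : List (List (Option Int))) : Int × Int :=
  let n : Int := board.length
  let bound1 : Int := n - 1 - x
  let bound2 : Int := -x
  let bounds := PySem.List.pyRange bound2 (bound1 + 1) 1
  let r := pvLoopA x y n board bounds none none
  (r.1.getD bound2, r.2.getD bound1)

-- ===== PORT B =====
-- downward for-loop of B: first dx that is off the board or occupied
def pvScanDown (x : Int) (y : Int) (n : Int) (board : List (List (Option Int))) :
    List Int → Option Int
  | [] => none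
  | dx :: rest =>
    if ¬(0 ≤ y + dx ∧ y + dx < n) ∨ pvCell x y board dx ≠ none then some dx
    else pvScanDown x y n board rest

-- upward for-loop of B: first dx holding an on-board piece
def pvScanUp (x : Int) (y : Int) (n : Int) (board : List (List (Option Int))) :
    List Int → Option Int
  | [] => none
  | dx :: rest =>
    if (0 ≤ y + dx ∧ y + dx < n) ∧ pvCell x y board dx ≠ none then some dx
    else pvScanUp x y n board rest

def findSameBlocks_alt (x : Int) (y : Int) (board : List (List (Option Int))) : Int × Int :=
  let n : Int := board.length
  let lo : Int := -x
  let hi : Int := n - 1 - x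
  let down1 := (pvScanDown x y n board (PySem.List.pyRange (min (-1) hi) (lo - 1) (-1))).getD lo
  let down2 := (pvScanUp x y n board (PySem.List.pyRange (max 1 lo) (hi + 1) 1)).getD hi
  (down1, down2)

-- ===== PRECONDITION & SPEC =====
-- Pre_ excludes ragged boards on which the diagonal crosses a too-short row: there the Python A
-- raises IndexError — except when its early break happens to stop before the short row, in which
-- case A still returns and B returns the same value (Pre_ is that little narrower than raising).
def Pre_findSameBlocks (x : Int) (y : Int) (board : List (List (Option Int))) : Prop :=
  ∀ i ∈ List.range board.length,
    (0 ≤ x + (i : Int) - y ∧ x + (i : Int) - y < (board.length : Int)) →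
      x + (i : Int) - y < ((board.getD i []).length : Int)
instance (x : Int) (y : Int) (board : List (List (Option Int))) : Decidable (Pre_findSameBlocks x y board) := by unfold Pre_findSameBlocks; infer_instance

def pvWitness_findSameBlocks : Int × Int × List (List (Option Int)) := (0, 0, [[some 1]])

-- When the start square lies below the board (y ≤ -2) while the top end of the diagonal is still
-- on the board, and no piece sits on the upward diagonal, A returns down2 = -y-1 (the last
-- off-board offset its sweep recorded) while B returns the board-edge bound len(board)-1-x,
-- the intended no-blocker answer.
def D_findSameBlocks (x : Int) (y : Int) (board : List (List (Option Int))) : Prop :=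
  max 1 (-x) ≤ (board.length : Int) - 1 - x ∧
  0 ≤ y + ((board.length : Int) - 1 - x) ∧
  y + ((board.length : Int) - 1 - x) < (board.length : Int) ∧
  max 1 (-x) ≤ -y - 1 ∧
  ∀ dx ∈ PySem.List.pyRange (max 1 (-x)) ((board.length : Int) - x) 1,
    0 ≤ y + dx → (board.getD (y + dx).toNat []).getD (x + dx).toNat none = none
instance (x : Int) (y : Int) (board : List (List (Option Int))) : Decidable (D_findSameBlocks x y board) := by unfold D_findSameBlocks; infer_instance

def Spec_findSameBlocks (x : Int) (y : Int) (board : List (List (Option Int))) (out : Int × Int) : Prop := ¬ D_findSameBlocks x y board → out = findSameBlocks_alt x y board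
instance (x : Int) (y : Int) (board : List (List (Option Int))) (out : Int × Int) : Decidable (Spec_findSameBlocks x y board out) := by unfold Spec_findSameBlocks; infer_instance

def pvDiffWitness_findSameBlocks : Int × Int × List (List (Option Int)) :=
  (0, -2, [[none, none, none], [none, none, none], [none, none, none]])
def pvDiffWitnessOut_findSameBlocks : (Int × Int) × (Int × Int) := ((0, 1), (0, 2))

-- ===== CLAIM (what is proved, stated in full; the proofs are below) =====
def Claim_unchanged_findSameBlocks : Prop := ∀ (x : Int) (y : Int) (board : List (List (Option Int))), Dom_findSameBlocks x y board → Pre_findSameBlocks x y board → Spec_findSameBlocks x y board (findSameBlocks x y board)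
def Claim_changed_findSameBlocks : Prop := Dom_findSameBlocks (pvDiffWitness_findSameBlocks.1) (pvDiffWitness_findSameBlocks.2.1) (pvDiffWitness_findSameBlocks.2.2) ∧ Pre_findSameBlocks (pvDiffWitness_findSameBlocks.1) (pvDiffWitness_findSameBlocks.2.1) (pvDiffWitness_findSameBlocks.2.2) ∧ D_findSameBlocks (pvDiffWitness_findSameBlocks.1) (pvDiffWitness_findSameBlocks.2.1) (pvDiffWitness_findSameBlocks.2.2) ∧ findSameBlocks (pvDiffWitness_findSameBlocks.1) (pvDiffWitness_findSameBlocks.2.1) (pvDiffWitness_findSameBlocks.2.2) = pvDiffWitnessOut_findSameBlocks.1 ∧ findSameBlocks_alt (pvDiffWitness_findSameBlocks.1) (pvDiffWitness_findSameBlocks.2.1) (pvDiffWitness_findSameBlocks.2.2) = pvDiffWitnessOut_findSameBlocks.2 ∧ pvDiffWitnessOut_findSameBlocks.1 ≠ pvDiffWitnessOut_findSameBlocks.2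
def Claim_exact_findSameBlocks : Prop := ∀ (x : Int) (y : Int) (board : List (List (Option Int))), Dom_findSameBlocks x y board → Pre_findSameBlocks x y board → D_findSameBlocks x y board → findSameBlocks x y board ≠ findSameBlocks_alt x y board

-- ===== LEMMAS AND PROOFS =====

-- Boolean forms of the three square classifications, shared by the characterisations
def pvBlockB (x : Int) (y : Int) (n : Int) (board : List (List (Option Int))) (dx : Int) : Bool :=
  !decide (0 ≤ y + dx ∧ y + dx < n) || decide (pvCell x y board dx ≠ none)
def pvPieceB (x : Int) (y : Int) (n : Int) (board : List (List (Option Int))) (dx : Int) : Bool :=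
  decide (0 ≤ y + dx ∧ y + dx < n) && decide (pvCell x y board dx ≠ none)
def pvOffB (y : Int) (n : Int) (dx : Int) : Bool :=
  !decide (0 ≤ y + dx ∧ y + dx < n)

theorem pvScanDown_eq_find (x y n : Int) (board : List (List (Option Int))) (l : List Int) :
    pvScanDown x y n board l = l.find? (pvBlockB x y n board) := by
  induction l with
  | nil => rfl
  | cons a t ih =>
    rw [pvScanDown, List.find?]
    by_cases h : ¬(0 ≤ y + a ∧ y + a < n) ∨ pvCell x y board a ≠ none
    · have hb : pvBlockB x y n board a = true := by
        simp [pvBlockB]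
        rcases h with h | h
        · left; omega
        · right; simpa using h
      rw [if_pos h, hb]
    · have hb : pvBlockB x y n board a = false := by
        simp [pvBlockB]
        push Not at h
        tauto
      rw [if_neg h, hb, ih]
theorem pvScanUp_eq_find (x y n : Int) (board : List (List (Option Int))) (l : List Int) :
    pvScanUp x y n board l = l.find? (pvPieceB x y n board) := by
  induction l with
  | nil => rfl
  | cons a t ih =>
    rw [pvScanUp, List.find?]
    by_cases h : (0 ≤ y + a ∧ y + a < n) ∧ pvCell x y board a ≠ none
    · have hb : pvPieceB x y n board a = true := by simp [pvPieceB]; tauto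
      rw [if_pos h, hb]
    · have hb : pvPieceB x y n board a = false := by
        simp [pvPieceB]; intro h1 h2; push Not at h; simpa using h ⟨h1, h2⟩
      rw [if_neg h, hb, ih]
theorem pvLoopA_neg (x y n : Int) (board : List (List (Option Int))) (l : List Int)
    (hneg : ∀ dx ∈ l, dx < 0) (rest : List Int) (d1 d2 : Option Int) :
    pvLoopA x y n board (l ++ rest) d1 d2 =
      pvLoopA x y n board rest ((l.reverse.find? (pvBlockB x y n board)).or d1) d2 := by
  induction l generalizing d1 with
  | nil => simp
  | cons a t ih =>
    have ha : a < 0 := hneg a (by simp)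
    have ht : ∀ dx ∈ t, dx < 0 := fun dx h => hneg dx (by simp [h])
    have step : pvLoopA x y n board ((a :: t) ++ rest) d1 d2 =
        pvLoopA x y n board (t ++ rest) (if pvBlockB x y n board a then some a else d1) d2 := by
      rw [List.cons_append, pvLoopA]
      by_cases honb : 0 ≤ y + a ∧ y + a < n
      · rw [if_pos honb]
        by_cases hc : pvCell x y board a ≠ none
        · rw [if_pos ⟨hc, by omega, by omega⟩]
          have : pvBlockB x y n board a = true := by simp [pvBlockB, hc]
          rw [this, if_pos rfl]
        · rw [if_neg (by tauto), if_neg (by tauto)]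
          have : pvBlockB x y n board a = false := by
            simp [pvBlockB, honb]; simpa using hc
          rw [this]; simp
      · rw [if_neg honb, if_pos (by omega)]
        have : pvBlockB x y n board a = true := by simp [pvBlockB, honb]
        rw [this, if_pos rfl]
    rw [step, ih ht]
    congr 1
    rw [List.reverse_cons, List.find?_append]
    have : List.find? (pvBlockB x y n board) [a] =
        if pvBlockB x y n board a then some a else none := by
      simp [List.find?]; split <;> simp_all
    rw [this, Option.or_assoc]
    congr 1
    split <;> simp
theorem pvLoopA_zero (x y n : Int) (board : List (List (Option Int))) (rest : List Int)
    (d1 d2 : Option Int) :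
    pvLoopA x y n board (((0:Int)) :: rest) d1 d2 = pvLoopA x y n board rest d1 d2 := by
  rw [pvLoopA]
  by_cases honb : 0 ≤ y + 0 ∧ y + 0 < n
  · rw [if_pos honb, if_neg (by omega), if_neg (by omega)]
  · rw [if_neg honb, if_neg (by omega), if_neg (by omega)]
theorem pvLoopA_pos (x y n : Int) (board : List (List (Option Int))) (l : List Int)
    (hpos : ∀ dx ∈ l, 0 < dx) (d1 d2 : Option Int) :
    pvLoopA x y n board l d1 d2 =
      (d1, (l.find? (pvPieceB x y n board)).or ((l.reverse.find? (pvOffB y n)).or d2)) := by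
  induction l generalizing d2 with
  | nil => simp [pvLoopA]
  | cons a t ih =>
    have ha : 0 < a := hpos a (by simp)
    have ht : ∀ dx ∈ t, 0 < dx := fun dx h => hpos dx (by simp [h])
    rw [pvLoopA, List.find?]
    by_cases honb : 0 ≤ y + a ∧ y + a < n
    · rw [if_pos honb]
      by_cases hc : pvCell x y board a ≠ none
      · have hp : pvPieceB x y n board a = true := by simp [pvPieceB, honb, hc]
        rw [if_neg (fun h => absurd h.2.2 (by omega)), if_pos ⟨hc, by omega, by omega⟩, hp]
        simp
      · have hp : pvPieceB x y n board a = false := by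
          simp [pvPieceB]; intro _ _; simpa using hc
        have hoff : pvOffB y n a = false := by simp [pvOffB, honb]
        rw [if_neg (by tauto), if_neg (by tauto), hp, ih ht]
        congr 2
        rw [List.reverse_cons, List.find?_append]
        simp [List.find?, hoff]
    · have hp : pvPieceB x y n board a = false := by simp [pvPieceB]; tauto
      have hoff : pvOffB y n a = true := by simp [pvOffB]; omega
      rw [if_neg honb, if_neg (by omega), if_pos (by omega), hp, ih ht]
      congr 1
      rw [List.reverse_cons, List.find?_append, Option.or_assoc]
      congr 1
      simp [List.find?, hoff]
-- characterisation of port A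
-- characterisation of port A
theorem A_char (x y : Int) (board : List (List (Option Int))) :
    findSameBlocks x y board =
      ( ((PySem.List.pyRange (-x) (min 0 ((board.length : Int) - x)) 1).reverse.find?
            (pvBlockB x y (board.length : Int) board)).getD (-x),
        (((PySem.List.pyRange (max 1 (-x)) ((board.length : Int) - x) 1).find?
            (pvPieceB x y (board.length : Int) board)).or
          ((PySem.List.pyRange (max 1 (-x)) ((board.length : Int) - x) 1).reverse.find?
            (pvOffB y (board.length : Int)))).getD ((board.length : Int) - 1 - x) ) := by
  have hn : (0:Int) ≤ (board.length : Int) := Int.natCast_nonneg _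
  unfold findSameBlocks
  dsimp only
  have hb1 : (board.length : Int) - 1 - x + 1 = (board.length : Int) - x := by ring
  rw [hb1]
  by_cases hx : 1 ≤ -x
  · -- x ≤ -1: no negative offsets, the whole range is positive
    have hmin : min 0 ((board.length : Int) - x) = 0 := by omega
    have hmax : max 1 (-x) = -x := by omega
    have hpos : ∀ dx ∈ PySem.List.pyRange (-x) ((board.length : Int) - x) 1, 0 < dx := by
      intro dx hdx; rw [PySem.List.mem_pyRange_one] at hdx; omega
    rw [pvLoopA_pos x y (board.length : Int) board _ hpos, hmin, hmax,
      PySem.List.pyRange_one_eq_nil (show (0:Int) ≤ -x by omega)]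
    simp
  · by_cases hx2 : (board.length : Int) ≤ x
    · -- x ≥ len(board): the whole range is negative
      have hmin : min 0 ((board.length : Int) - x) = (board.length : Int) - x := by omega
      have hneg : ∀ dx ∈ PySem.List.pyRange (-x) ((board.length : Int) - x) 1, dx < 0 := by
        intro dx hdx; rw [PySem.List.mem_pyRange_one] at hdx; omega
      have hnil : PySem.List.pyRange (max 1 (-x)) ((board.length : Int) - x) 1 = [] :=
        PySem.List.pyRange_one_eq_nil (by omega)
      rw [← List.append_nil (PySem.List.pyRange (-x) ((board.length : Int) - x) 1),
        pvLoopA_neg x y (board.length : Int) board _ hneg, hmin, hnil]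
      simp [pvLoopA]
    · -- on-board column: split the range at 0 and 1
      have hmin : min 0 ((board.length : Int) - x) = 0 := by omega
      have hmax : max 1 (-x) = 1 := by omega
      have hsplit : PySem.List.pyRange (-x) ((board.length : Int) - x) 1 =
          PySem.List.pyRange (-x) 0 1 ++
            ((0:Int) :: PySem.List.pyRange 1 ((board.length : Int) - x) 1) := by
        rw [PySem.List.pyRange_one_append (-x) 0 ((board.length : Int) - x) (by omega) (by omega),
          PySem.List.pyRange_one_append 0 1 ((board.length : Int) - x) (by omega) (by omega),
          show PySem.List.pyRange 0 1 1 = [0] by decide]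
        simp
      have hneg : ∀ dx ∈ PySem.List.pyRange (-x) 0 1, dx < 0 := by
        intro dx hdx; rw [PySem.List.mem_pyRange_one] at hdx; omega
      have hpos : ∀ dx ∈ PySem.List.pyRange 1 ((board.length : Int) - x) 1, 0 < dx := by
        intro dx hdx; rw [PySem.List.mem_pyRange_one] at hdx; omega
      rw [hsplit, pvLoopA_neg x y (board.length : Int) board _ hneg, pvLoopA_zero,
        pvLoopA_pos x y (board.length : Int) board _ hpos, hmin, hmax]
      simp

theorem B_char (x y : Int) (board : List (List (Option Int))) :
    findSameBlocks_alt x y board =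
      ( ((PySem.List.pyRange (-x) (min 0 ((board.length : Int) - x)) 1).reverse.find?
            (pvBlockB x y (board.length : Int) board)).getD (-x),
        ((PySem.List.pyRange (max 1 (-x)) ((board.length : Int) - x) 1).find?
            (pvPieceB x y (board.length : Int) board)).getD ((board.length : Int) - 1 - x) ) := by
  unfold findSameBlocks_alt
  simp only [pvScanDown_eq_find, pvScanUp_eq_find, PySem.List.pyRange_neg_one_eq_reverse]
  have h2 : min (-1) ((board.length : Int) - 1 - x) + 1 = min 0 ((board.length : Int) - x) := by
    omega
  have h1 : (-x : Int) - 1 + 1 = -x := by ring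
  have h3 : (board.length : Int) - 1 - x + 1 = (board.length : Int) - x := by ring
  rw [h1, h2, h3]

-- inside D_ no element of the upward range is an on-board piece
theorem pvCell_eq_getD (x y : Int) (board : List (List (Option Int))) (dx : Int)
    (hy : 0 ≤ y + dx) (hx : 0 ≤ x + dx) :
    pvCell x y board dx = (board.getD (y + dx).toNat []).getD (x + dx).toNat none := by
  unfold pvCell
  rw [PySem.List.pyGetD_of_nonneg board [] hy, PySem.List.pyGetD_of_nonneg _ none hx]

-- inside D_ no element of the upward range is an on-board piece
theorem pvD_no_piece (x y : Int) (board : List (List (Option Int)))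
    (hD : D_findSameBlocks x y board) :
    (PySem.List.pyRange (max 1 (-x)) ((board.length : Int) - x) 1).find?
      (pvPieceB x y (board.length : Int) board) = none := by
  obtain ⟨h1, h2, h3, h4, h5⟩ := hD
  rw [List.find?_eq_none]
  intro dx hdx
  have hmem := (PySem.List.mem_pyRange_one).1 hdx
  simp only [pvPieceB, Bool.and_eq_true, decide_eq_true_eq, not_and]
  intro honb
  rw [pvCell_eq_getD x y board dx honb.1 (by omega)]
  simpa [List.getD_eq_getElem?_getD] using h5 dx hdx honb.1

theorem findSameBlocks_down2_eq (x y : Int) (board : List (List (Option Int)))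
    (hnD : ¬ D_findSameBlocks x y board) :
    findSameBlocks x y board = findSameBlocks_alt x y board := by
  rw [A_char, B_char]
  simp only [Prod.mk.injEq]
  refine ⟨by trivial, ?_⟩
  cases hF : (PySem.List.pyRange (max 1 (-x)) ((board.length : Int) - x) 1).find?
      (pvPieceB x y (board.length : Int) board) with
  | some v => simp
  | none =>
    simp only [Option.none_or, Option.getD_none]
    by_cases hsh : max 1 (-x) ≤ (board.length : Int) - 1 - x
    · by_cases htop : 0 ≤ y + ((board.length : Int) - 1 - x) ∧
          y + ((board.length : Int) - 1 - x) < (board.length : Int)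
      · by_cases hys : max 1 (-x) ≤ -y - 1
        · exfalso
          apply hnD
          refine ⟨hsh, htop.1, htop.2, hys, ?_⟩
          intro dx hdx hy0
          have hmem := (PySem.List.mem_pyRange_one).1 hdx
          have hnp := (List.find?_eq_none).1 hF dx hdx
          simp only [pvPieceB, Bool.and_eq_true, decide_eq_true_eq, not_and] at hnp
          have hcell : pvCell x y board dx = none := by
            by_contra hc
            exact (hnp ⟨hy0, by omega⟩) hc
          rw [← pvCell_eq_getD x y board dx hy0 (by omega)]
          exact hcell
        · -- no off-board offset above the square: the fallback search finds nothing
          have hnone : (PySem.List.pyRange (max 1 (-x)) ((board.length : Int) - x) 1).reverse.find?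
              (pvOffB y (board.length : Int)) = none := by
            rw [List.find?_eq_none]
            intro dx hdx
            rw [List.mem_reverse, PySem.List.mem_pyRange_one] at hdx
            simp only [pvOffB, Bool.not_eq_eq_eq_not, Bool.not_true,
              decide_eq_false_iff_not, not_and, not_lt]
            omega
          simp [hnone]
      · -- the top offset itself is off the board: it heads the reversed range
        have hrev : (PySem.List.pyRange (max 1 (-x)) ((board.length : Int) - x) 1).reverse =
            ((board.length : Int) - 1 - x) ::
              PySem.List.pyRange ((board.length : Int) - 1 - x - 1) (max 1 (-x) - 1) (-1) := by
          rw [show PySem.List.pyRange (max 1 (-x)) ((board.length : Int) - x) 1 =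
              PySem.List.pyRange ((max 1 (-x)) - 1 + 1) (((board.length : Int) - 1 - x) + 1) 1
            by congr 1 <;> omega]
          rw [← PySem.List.pyRange_neg_one_eq_reverse,
            PySem.List.pyRange_neg_one_cons
              (by omega : max 1 (-x) - 1 < (board.length : Int) - 1 - x)]
        rw [hrev, List.find?]
        have hob : pvOffB y (board.length : Int) ((board.length : Int) - 1 - x) = true := by
          simp only [pvOffB, Bool.not_eq_eq_eq_not, Bool.not_true, decide_eq_false_iff_not]
          exact htop
        rw [hob]
        simp
    · -- empty upward range
      have hnil : PySem.List.pyRange (max 1 (-x)) ((board.length : Int) - x) 1 = [] :=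
        PySem.List.pyRange_one_eq_nil (by omega)
      simp [hnil]

-- ===== VERDICT (by name: the statement is the Claim_ definition above) =====
theorem findSameBlocks_spec : Claim_unchanged_findSameBlocks := by
  intro x y board _ _ hnD
  exact findSameBlocks_down2_eq x y board hnD

theorem findSameBlocks_changed : Claim_changed_findSameBlocks := by
  unfold Claim_changed_findSameBlocks; decide

theorem findSameBlocks_tight : Claim_exact_findSameBlocks := by
  intro x y board _ _ hD
  have hDkeep := hD
  obtain ⟨h1, h2, h3, h4, h5⟩ := hDkeep
  rw [A_char, B_char, pvD_no_piece x y board hD]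
  -- in the reversed upward range every offset down to -y is on the board, then -y-1 is not
  have hsplit : PySem.List.pyRange (max 1 (-x)) ((board.length : Int) - x) 1 =
      PySem.List.pyRange (max 1 (-x)) (-y) 1 ++
        PySem.List.pyRange (-y) ((board.length : Int) - x) 1 :=
    PySem.List.pyRange_one_append _ _ _ (by omega) (by omega)
  have hfst : (PySem.List.pyRange (-y) ((board.length : Int) - x) 1).reverse.find?
      (pvOffB y (board.length : Int)) = none := by
    rw [List.find?_eq_none]
    intro dx hdx
    rw [List.mem_reverse, PySem.List.mem_pyRange_one] at hdx
    simp only [pvOffB, Bool.not_eq_eq_eq_not, Bool.not_true,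
      decide_eq_false_iff_not, not_and, not_lt]
    omega
  have hsnd : (PySem.List.pyRange (max 1 (-x)) (-y) 1).reverse.find?
      (pvOffB y (board.length : Int)) = some (-y - 1) := by
    have hrev : (PySem.List.pyRange (max 1 (-x)) (-y) 1).reverse =
        (-y - 1) :: PySem.List.pyRange (-y - 1 - 1) (max 1 (-x) - 1) (-1) := by
      rw [show PySem.List.pyRange (max 1 (-x)) (-y) 1 =
          PySem.List.pyRange ((max 1 (-x)) - 1 + 1) ((-y - 1) + 1) 1 by congr 1 <;> omega]
      rw [← PySem.List.pyRange_neg_one_eq_reverse,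
        PySem.List.pyRange_neg_one_cons (by omega : max 1 (-x) - 1 < -y - 1)]
    rw [hrev, List.find?]
    have hob : pvOffB y (board.length : Int) (-y - 1) = true := by
      simp only [pvOffB, Bool.not_eq_eq_eq_not, Bool.not_true, decide_eq_false_iff_not]
      omega
    rw [hob]
  have hG : (PySem.List.pyRange (max 1 (-x)) ((board.length : Int) - x) 1).reverse.find?
      (pvOffB y (board.length : Int)) = some (-y - 1) := by
    rw [hsplit, List.reverse_append, List.find?_append, hfst, hsnd]
    rfl
  rw [hG]
  simp only [Option.none_or, Option.getD_some, Option.getD_none, ne_eq, Prod.mk.injEq, not_and]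
  intro _
  omega
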